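-- pv_equiv track=rewrite | github.com/apeltop/learning | algorithm/programmers/19919/19919_2.py | solution
-- ===== SOURCE A (Python) =====
-- import collections
--
-- def isValid(s):
--     stack = []
--     table = {
--         ')': '(',
--     }
--
--     for char in s:
--         if char not in table:
--             stack.append(char)
--         elif not stack or table[char] != stack.pop():
--             return False
--     return len(stack) == 0
--
-- def solution(arr1, arr2):
--     answer = -1
--
--     validB1 = [a for a in arr1 if isValid(a)]
--     validB2 = [a for a in arr2 if isValid(a)]
--     inValidB1 = [a for a in arr1 if not isValid(a)]
--     inValidB2 = [a for a in arr2 if not isValid(a)]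
--
--     inValidDict1 = collections.defaultdict(list)
--     for v in inValidB1:
--         while '()' in v:
--             v = v.replace('()', '')
--         inValidDict1[v].append(v)
--
--     inValidDict2 = collections.defaultdict(list)
--     for v in inValidB2:
--         newExp = ''
--         # while '()' in v:
--         #     v = v.replace('()', '')
--
--         for i in range(len(v)):
--             if v[i] == '(':
--                 newExp += ')'
--             elif v[i] == ')':
--                 newExp += '('
--         inValidDict2[newExp[::-1]].append(newExp)
--
--     if validB1 and validB2:
--         answer = len(validB1) * len(validB2)
--
--     for k, v in inValidDict1.items():
--         l = inValidDict2[k]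
--         answer += len(v) * len(l)
--
--     return answer
-- ===== SOURCE B (Python) =====
-- def solution(arr1, arr2):
--     def is_valid(s):
--         d = 0
--         for ch in s:
--             if ch == '(':
--                 d += 1
--             elif ch == ')':
--                 if d == 0:
--                     return False
--                 d -= 1
--             else:
--                 return False
--         return d == 0
--
--     def reduce_key(s):
--         st = []
--         for ch in s:
--             if ch == ')' and st and st[-1] == '(':
--                 st.pop()
--             else:
--                 st.append(ch)
--         return ''.join(st)
--
--     def need_key(s):
--         return ''.join(')' if ch == '(' else '(' for ch in reversed(s) if ch in '()')
--
--     def scan(arr, key):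
--         valid = 0
--         counts = {}
--         for s in arr:
--             if is_valid(s):
--                 valid += 1
--             else:
--                 k = key(s)
--                 counts[k] = counts.get(k, 0) + 1
--         return valid, counts
--
--     v1, c1 = scan(arr1, reduce_key)
--     v2, c2 = scan(arr2, need_key)
--     answer = v1 * v2 if v1 and v2 else -1
--     for k, n in c1.items():
--         answer += n * c2.get(k, 0)
--     return answer
-- ===== Notes on version B (the rewrite author's own statement) =====
-- stated objective: faster
-- what changed: Replaces A's repeated whole-string str.replace('()','') loop and its four validity-filter passes with one pass per list: an O(len) depth-counter validity test and an O(len) single stack reduction per string, counting multiplicities in a dict instead of grouping lists of strings.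
import Mathlib
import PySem

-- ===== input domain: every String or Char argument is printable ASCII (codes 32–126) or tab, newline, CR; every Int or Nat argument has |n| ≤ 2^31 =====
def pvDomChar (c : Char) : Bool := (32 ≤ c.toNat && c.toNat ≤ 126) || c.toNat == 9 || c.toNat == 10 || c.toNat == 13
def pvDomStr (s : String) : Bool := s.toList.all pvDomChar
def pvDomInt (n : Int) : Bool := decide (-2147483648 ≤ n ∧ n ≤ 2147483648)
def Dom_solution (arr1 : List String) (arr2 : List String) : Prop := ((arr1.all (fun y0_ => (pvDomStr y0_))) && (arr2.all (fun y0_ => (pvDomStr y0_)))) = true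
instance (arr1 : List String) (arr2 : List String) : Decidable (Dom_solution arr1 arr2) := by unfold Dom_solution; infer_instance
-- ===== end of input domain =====

-- B replaces A's repeated whole-string "()"-replace loop and its four validity filter
-- passes with one linear pass per list (depth-counter validity test, one-shot stack
-- reduction, multiplicity counters instead of grouped lists); objective: faster.

-- ===== PORT A =====

-- One left-to-right non-overlapping pass of v.replace("()", ""): the value
-- PySem.Chars.replace computes for old = "()", new = "" (pvReplace_eq_repl below).
-- Used only by the termination proof of pvLoopA and by the lemmas.
def pvRepl : List Char → List Char
  | [] => []
  | c :: t => if c = '(' ∧ t.head? = some ')' then pvRepl t.tail else c :: pvRepl t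
termination_by l => l.length
decreasing_by
  · simp only [List.length_tail, List.length_cons]; omega
  · simp only [List.length_cons]; omega

theorem pvRepl_len_le (l : List Char) : (pvRepl l).length ≤ l.length := by
  induction l using pvRepl.induct with
  | case1 => simp [pvRepl]
  | case2 c t h ih =>
      rw [pvRepl, if_pos h]
      have : t.tail.length ≤ t.length := by simp [List.length_tail]
      simp only [List.length_cons]; omega
  | case3 c t h ih => rw [pvRepl, if_neg h]; simpa using ih

theorem pvPrefix_pair (c : Char) (t : List Char) :
    ['(', ')'] <+: c :: t ↔ c = '(' ∧ t.head? = some ')' := by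
  cases t <;> simp [List.cons_prefix_cons, eq_comm]

theorem pvRepl_len_lt (l : List Char) (h : ['(', ')'] <:+: l) :
    (pvRepl l).length < l.length := by
  induction l using pvRepl.induct with
  | case1 => simp at h
  | case2 c t hc ih =>
      rw [pvRepl, if_pos hc]
      have ht : t ≠ [] := by
        rcases hc with ⟨_, hh⟩; cases t <;> simp_all
      have h1 := pvRepl_len_le t.tail
      have h2 : t.tail.length = t.length - 1 := by simp [List.length_tail]
      have h3 : 1 ≤ t.length := List.length_pos_iff.mpr ht
      simp only [List.length_cons]; omega
  | case3 c t hc ih =>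
      rw [pvRepl, if_neg hc]
      obtain ⟨pre, post, hsplit⟩ := h
      cases pre with
      | nil =>
          exfalso; apply hc
          rw [← pvPrefix_pair c t]
          exact ⟨post, by simpa using hsplit⟩
      | cons p pre' =>
          simp only [List.cons_append] at hsplit
          injection hsplit with _ h2
          have := ih ⟨pre', post, h2⟩
          simp only [List.length_cons]; omega

theorem pvReplaceGo_eq_repl (fuel : Nat) :
    ∀ (l acc : List Char), l.length ≤ fuel →
      PySem.Chars.replace.go ['(', ')'] [] fuel l acc = acc.reverse ++ pvRepl l := by
  induction fuel with
  | zero =>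
      intro l acc hl
      have : l = [] := by cases l <;> simp_all
      subst this
      simp [PySem.Chars.replace.go, pvRepl]
  | succ n ih =>
      intro l acc hl
      cases l with
      | nil => simp [PySem.Chars.replace.go, pvRepl]
      | cons c t =>
          rw [PySem.Chars.replace.go]
          by_cases hp : ['(', ')'].isPrefixOf (c :: t) = true
          · rw [if_pos hp]
            have hct := (pvPrefix_pair c t).mp (List.isPrefixOf_iff_prefix.mp hp)
            cases t with
            | nil => simp at hct
            | cons b t' =>
                obtain ⟨hc, hb⟩ := hct
                simp only [List.head?_cons, Option.some.injEq] at hb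
                subst hc; subst hb
                simp only [List.length_cons] at hl
                simp only [List.length_cons, List.drop_succ_cons, List.length_nil,
                  List.drop_zero, List.reverse_nil, List.nil_append]
                rw [ih t' acc (by omega)]
                rw [pvRepl, if_pos (by simp)]
                simp
          · rw [if_neg hp]
            simp only [List.length_cons] at hl
            rw [ih t (c :: acc) (by omega)]
            rw [pvRepl,
              if_neg (fun hcont => hp (List.isPrefixOf_iff_prefix.mpr ((pvPrefix_pair c t).mpr hcont)))]
            simp

theorem pvReplace_eq_repl (l : List Char) :
    PySem.Chars.replace l ['(', ')'] [] = pvRepl l := by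
  rw [PySem.Chars.replace]
  simp only [List.isEmpty_cons, Bool.false_eq_true, if_false]
  exact pvReplaceGo_eq_repl l.length l [] le_rfl

theorem pvReplaceShrink (v : List Char) (h : PySem.Chars.isIn ['(', ')'] v = true) :
    (PySem.Chars.replace v ['(', ')'] []).length < v.length := by
  rw [pvReplace_eq_repl]
  exact pvRepl_len_lt v ((PySem.Chars.isIn_iff_infix _ _).mp h)

-- while '()' in v: v = v.replace('()', '')
def pvLoopA (v : List Char) : List Char :=
  if h : PySem.Chars.isIn ['(', ')'] v = true then
    pvLoopA (PySem.Chars.replace v ['(', ')'] [])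
  else v
termination_by v.length
decreasing_by exact pvReplaceShrink v h

-- isValid(s): stack of characters, table = {')': '('}; top of stack at the head
def pvIsValidGoA : List Char → List Char → Bool
  | st, [] => st.length == 0
  | st, c :: cs =>
    if c == ')' then
      match st with
      | [] => false
      | t :: st' => if '(' == t then pvIsValidGoA st' cs else false
    else pvIsValidGoA (c :: st) cs

def pvIsValidA (s : String) : Bool := pvIsValidGoA [] s.toList

-- newExp built char by char over range(len(v)); v[i] via pyGetD (in range on this loop)
def pvNewExpA (v : String) : List Char :=
  (PySem.List.pyRange 0 (PySem.Str.len v) 1).foldl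
    (fun acc i =>
      if PySem.List.pyGetD v.toList i ' ' == '(' then acc ++ [')']
      else if PySem.List.pyGetD v.toList i ' ' == ')' then acc ++ ['('] else acc) []

def solution (arr1 : List String) (arr2 : List String) : Int :=
  let validB1 := arr1.filter (fun a => pvIsValidA a)
  let validB2 := arr2.filter (fun a => pvIsValidA a)
  let inValidB1 := arr1.filter (fun a => !pvIsValidA a)
  let inValidB2 := arr2.filter (fun a => !pvIsValidA a)
  let inValidDict1 : PySem.Dict String (List String) :=
    inValidB1.foldl (fun d v0 =>
      let v := String.mk (pvLoopA v0.toList)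
      d.insert v (d.getD v [] ++ [v])) PySem.Dict.empty
  let inValidDict2 : PySem.Dict String (List String) :=
    inValidB2.foldl (fun d v =>
      let newExp := pvNewExpA v
      -- newExp[::-1]: slice with step -1 (total for step ≠ 0)
      let k := String.mk ((PySem.List.slice? newExp none none (-1)).getD [])
      d.insert k (d.getD k [] ++ [String.mk newExp])) PySem.Dict.empty
  let answer : Int :=
    if validB1 ≠ [] ∧ validB2 ≠ [] then (validB1.length : Int) * (validB2.length : Int) else -1
  inValidDict1.items.foldl
    (fun ans kv => ans + (kv.2.length : Int) * ((inValidDict2.getD kv.1 []).length : Int)) answer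

-- ===== PORT B =====

-- is_valid(s): single depth counter
def pvIsValidB : Int → List Char → Bool
  | d, [] => d == 0
  | d, c :: cs =>
    if c == '(' then pvIsValidB (d + 1) cs
    else if c == ')' then (if d == 0 then false else pvIsValidB (d - 1) cs)
    else false

-- reduce_key(s): one stack pass (st[-1]/pop at the list end, as in Source B)
def pvReduceKeyB (s : String) : String :=
  String.mk (s.toList.foldl
    (fun st c => if c == ')' && st.getLast? == some '(' then st.dropLast else st ++ [c]) [])

-- need_key(s): flip parens over reversed s, dropping other characters
def pvNeedKeyB (s : String) : String :=
  String.mk (s.toList.reverse.filterMap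
    (fun c => if c == '(' then some ')' else if c == ')' then some '(' else none))

-- scan(arr, key): one pass producing (valid count, multiplicity counter)
def pvScanB (arr : List String) (key : String → String) : Int × PySem.Dict String Int :=
  arr.foldl (fun p s =>
    if pvIsValidB 0 s.toList then (p.1 + 1, p.2)
    else (p.1, p.2.insert (key s) (p.2.getD (key s) 0 + 1))) (0, PySem.Dict.empty)

def solution_alt (arr1 : List String) (arr2 : List String) : Int :=
  let r1 := pvScanB arr1 pvReduceKeyB
  let r2 := pvScanB arr2 pvNeedKeyB
  let answer : Int := if r1.1 ≠ 0 ∧ r2.1 ≠ 0 then r1.1 * r2.1 else -1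
  r1.2.items.foldl (fun ans kv => ans + kv.2 * r2.2.getD kv.1 0) answer

-- ===== PRECONDITION & SPEC =====
def Spec_solution (arr1 : List String) (arr2 : List String) (out : Int) : Prop := out = solution_alt arr1 arr2
instance (arr1 : List String) (arr2 : List String) (out : Int) : Decidable (Spec_solution arr1 arr2 out) := by unfold Spec_solution; infer_instance

-- ===== CLAIM (what is proved, stated in full; the proofs are below) =====
def Claim_equal_solution : Prop := ∀ (arr1 : List String) (arr2 : List String), Dom_solution arr1 arr2 → Spec_solution arr1 arr2 (solution arr1 arr2)

-- ===== LEMMAS AND PROOFS =====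

-- ---- validity: A's char stack equals B's depth counter ----

theorem pvIsValidGoA_bad (cs : List Char) :
    ∀ st : List Char, (∃ x ∈ st, x ≠ '(') → pvIsValidGoA st cs = false := by
  induction cs with
  | nil =>
      intro st ⟨x, hx, _⟩
      have : st ≠ [] := by rintro rfl; simp at hx
      simp [pvIsValidGoA, List.length_eq_zero_iff, this]
  | cons c cs ih =>
      intro st hst
      rw [pvIsValidGoA.eq_def]
      by_cases hc : (c == ')') = true
      · simp only [hc, if_true]
        obtain ⟨x, hx, hxne⟩ := hst
        cases st with
        | nil => simp at hx
        | cons t st' =>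
            by_cases ht : ('(' == t) = true
            · simp only [ht, if_true]
              apply ih
              refine ⟨x, ?_, hxne⟩
              rcases List.mem_cons.mp hx with h | h
              · exfalso; apply hxne; rw [h]; exact (beq_iff_eq.mp ht).symm
              · exact h
            · simp [ht]
      · simp only [hc, if_false]
        apply ih
        obtain ⟨x, hx, hxne⟩ := hst
        exact ⟨x, List.mem_cons_of_mem c hx, hxne⟩

theorem pvEqA_nil (st : List Char) : pvIsValidGoA st [] = (st.length == 0) := by
  rw [pvIsValidGoA]

theorem pvEqA_push (st : List Char) (c : Char) (cs : List Char) (h : (c == ')') = false) :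
    pvIsValidGoA st (c :: cs) = pvIsValidGoA (c :: st) cs := by
  rw [pvIsValidGoA.eq_def]; simp [h]

theorem pvEqA_pop_nil (c : Char) (cs : List Char) (h : (c == ')') = true) :
    pvIsValidGoA [] (c :: cs) = false := by
  rw [pvIsValidGoA.eq_def]; simp [h]

theorem pvEqA_pop (t : Char) (st : List Char) (c : Char) (cs : List Char)
    (h : (c == ')') = true) :
    pvIsValidGoA (t :: st) (c :: cs) = if '(' == t then pvIsValidGoA st cs else false := by
  rw [pvIsValidGoA.eq_def]; simp [h]

theorem pvIsValidGoA_rep (cs : List Char) :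
    ∀ d : Nat, pvIsValidGoA (List.replicate d '(') cs = pvIsValidB (d : Int) cs := by
  induction cs with
  | nil =>
      intro d
      rw [pvEqA_nil, pvIsValidB]
      cases d with
      | zero => simp
      | succ n =>
          simp only [List.length_replicate]
          have h1 : ((n + 1 : Nat) == 0) = false := by simp
          have h2 : (((n : Int) + 1) == 0) = false := by simp; omega
          rw [h1]
          push_cast
          rw [h2]
  | cons c cs ih =>
      intro d
      by_cases hc : (c == ')') = true
      · have hcv : c = ')' := beq_iff_eq.mp hc
        have hB : pvIsValidB (d : Int) (c :: cs)
            = if (d : Int) == 0 then false else pvIsValidB ((d : Int) - 1) cs := by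
          rw [pvIsValidB]; simp [hcv]
        cases d with
        | zero =>
            rw [show List.replicate 0 '(' = ([] : List Char) from rfl]
            rw [pvEqA_pop_nil c cs hc, hB]
            simp
        | succ k =>
            rw [List.replicate_succ, pvEqA_pop '(' (List.replicate k '(') c cs hc]
            rw [if_pos (show ('(' == '(') = true by simp)]
            rw [ih k, hB]
            have hz : (((k : Nat) + 1 : Int) == 0) = false := by simp; omega
            push_cast
            rw [hz]
            simp only [Bool.false_eq_true, if_false]
            rw [show ((k : Int) + 1 - 1) = (k : Int) by ring]
      · have hc' : (c == ')') = false := by simpa using hc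
        rw [pvEqA_push (List.replicate d '(') c cs hc']
        by_cases ho : (c == '(') = true
        · have hcv : c = '(' := beq_iff_eq.mp ho
          rw [show c :: List.replicate d '(' = List.replicate (d + 1) '(' by
            rw [hcv, List.replicate_succ]]
          rw [ih (d + 1)]
          conv_rhs => rw [pvIsValidB.eq_def]
          simp only [ho, if_true]
          push_cast
          rfl
        · have ho' : (c == '(') = false := by simpa using ho
          rw [pvIsValidGoA_bad cs (c :: List.replicate d '(')
            ⟨c, List.mem_cons_self, fun hcc => by simp [hcc] at ho⟩]
          rw [pvIsValidB.eq_def]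
          simp [ho', hc']

theorem pvIsValid_eq (s : String) : pvIsValidA s = pvIsValidB 0 s.toList := by
  simpa [pvIsValidA] using pvIsValidGoA_rep s.toList 0

-- ---- reduction: A's replace-until-fixpoint equals B's one stack pass ----

def pvStepB (st : List Char) (c : Char) : List Char :=
  if c == ')' && st.getLast? == some '(' then st.dropLast else st ++ [c]

theorem pvStepB_pair (st : List Char) : pvStepB (pvStepB st '(') ')' = st := by
  simp [pvStepB]

theorem pvFold_repl (l : List Char) :
    ∀ st : List Char, (pvRepl l).foldl pvStepB st = l.foldl pvStepB st := by
  induction l using pvRepl.induct with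
  | case1 => intro st; rw [pvRepl]
  | case2 c t h ih =>
      intro st
      obtain ⟨hc, hh⟩ := h
      cases t with
      | nil => simp at hh
      | cons b t' =>
          simp only [List.head?_cons, Option.some.injEq] at hh
          subst hc; subst hh
          rw [pvRepl, if_pos (by simp)]
          simp only [List.tail_cons] at ih ⊢
          rw [ih st]
          simp only [List.foldl_cons]
          rw [pvStepB_pair st]
  | case3 c t h ih =>
      intro st
      rw [pvRepl, if_neg h]
      simp only [List.foldl_cons]
      exact ih (pvStepB st c)

theorem pvFold_fix (l : List Char) :
    ∀ st : List Char, ¬ (['(', ')'] <:+: st ++ l) → l.foldl pvStepB st = st ++ l := by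
  induction l with
  | nil => intro st _; simp
  | cons c t ih =>
      intro st h
      simp only [List.foldl_cons]
      by_cases hcond : (c == ')' && st.getLast? == some '(') = true
      · exfalso
        simp only [Bool.and_eq_true, beq_iff_eq] at hcond
        obtain ⟨hc, hlast⟩ := hcond
        obtain ⟨st', rfl⟩ := List.getLast?_eq_some_iff.mp hlast
        apply h
        refine ⟨st', t, ?_⟩
        subst hc; simp
      · rw [show pvStepB st c = st ++ [c] from by rw [pvStepB, if_neg hcond]]
        rw [ih (st ++ [c]) (by simpa using h)]
        simp

theorem pvLoopA_eq_fold (l : List Char) : pvLoopA l = l.foldl pvStepB [] := by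
  induction l using pvLoopA.induct with
  | case1 v h ih =>
      rw [pvLoopA, dif_pos h, ih, pvReplace_eq_repl]
      exact pvFold_repl v []
  | case2 v h =>
      rw [pvLoopA, dif_neg h]
      have hni : ¬ (['(', ')'] <:+: v) := by
        intro hinf
        exact h ((PySem.Chars.isIn_iff_infix _ _).mpr hinf)
      rw [pvFold_fix v [] (by simpa using hni)]
      simp

-- ---- arr2 keys: A's indexed newExp loop + [::-1] equals B's reversed filterMap ----

def pvFlip (c : Char) : Option Char :=
  if c == '(' then some ')' else if c == ')' then some '(' else none

theorem pvFoldFlip (l : List Char) :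
    ∀ acc : List Char,
      l.foldl (fun acc c =>
        if c == '(' then acc ++ [')'] else if c == ')' then acc ++ ['('] else acc) acc
        = acc ++ l.filterMap pvFlip := by
  induction l with
  | nil => intro acc; simp
  | cons c t ih =>
      intro acc
      simp only [List.foldl_cons, List.filterMap_cons]
      by_cases h1 : (c == '(') = true
      · simp only [h1, if_true, pvFlip, ih]; simp
      · by_cases h2 : (c == ')') = true
        · simp only [h1, h2, if_true, if_false, pvFlip, ih]; simp
        · simp only [h1, h2, if_false, pvFlip, ih]; simp

theorem pvNewExpA_eq (v : String) : pvNewExpA v = v.toList.filterMap pvFlip := by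
  unfold pvNewExpA
  rw [PySem.Str.len_eq]
  rw [PySem.List.foldl_pyRange_zero_pyGetD' v.toList ' '
    (fun acc c => if c == '(' then acc ++ [')'] else if c == ')' then acc ++ ['('] else acc) []]
  simpa using pvFoldFlip v.toList []

theorem pvKey2_eq (v : String) :
    String.mk ((PySem.List.slice? (pvNewExpA v) none none (-1)).getD []) = pvNeedKeyB v := by
  rw [PySem.List.slice?_none_none_neg_one, pvNewExpA_eq]
  unfold pvNeedKeyB
  rw [← List.filterMap_reverse]
  rfl

-- ---- A's defaultdict of lists: entry lengths are multiplicities ----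

theorem pvDictA_getD (k g : String → String) (l : List String) :
    ∀ (d : PySem.Dict String (List String)) (k0 : String),
      ((l.foldl (fun d v => d.insert (k v) (d.getD (k v) [] ++ [g v])) d).getD k0 []).length
        = (d.getD k0 []).length + (l.map k).count k0 := by
  induction l with
  | nil => intro d k0; simp
  | cons v t ih =>
      intro d k0
      simp only [List.foldl_cons, List.map_cons]
      rw [ih, PySem.Dict.getD_insert]
      by_cases h : k0 = k v
      · subst h
        simp [List.count_cons]
        omega
      · rw [if_neg h, List.count_cons]
        have : (k v == k0) = false := by simp [Ne.symm h]
        simp [this]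

-- ---- B's scan: valid count + counter ----

theorem pvScanB_go (key : String → String) (arr : List String) :
    ∀ (n : Int) (d : PySem.Dict String Int),
      arr.foldl (fun p s =>
        if pvIsValidB 0 s.toList then (p.1 + 1, p.2)
        else (p.1, p.2.insert (key s) (p.2.getD (key s) 0 + 1))) (n, d)
      = (n + (arr.countP (fun s => pvIsValidB 0 s.toList) : Int),
         ((arr.filter (fun s => !pvIsValidB 0 s.toList)).map key).foldl
           (fun d x => d.insert x (d.getD x 0 + 1)) d) := by
  induction arr with
  | nil => intro n d; simp
  | cons s t ih =>
      intro n d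
      simp only [List.foldl_cons, List.countP_cons, List.filter_cons]
      by_cases h : pvIsValidB 0 s.toList = true
      · rw [if_pos h, ih]
        simp [h]
        push_cast
        ring_nf
      · rw [if_neg h, ih]
        have h' : pvIsValidB 0 s.toList = false := by simpa using h
        simp [h']

theorem pvScanB_eq (arr : List String) (key : String → String) :
    pvScanB arr key
      = ((arr.countP (fun s => pvIsValidB 0 s.toList) : Int),
         PySem.Dict.counter ((arr.filter (fun s => !pvIsValidB 0 s.toList)).map key)) := by
  unfold pvScanB
  rw [pvScanB_go key arr 0 PySem.Dict.empty]
  rw [PySem.Dict.foldl_insert_getD_add_one_eq_counter]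
  simp

-- ---- the common closed form of both programs ----

theorem pvSolution_eq_canon (arr1 arr2 : List String) :
    solution arr1 arr2 =
      (if arr1.countP (fun s => pvIsValidB 0 s.toList) ≠ 0 ∧
          arr2.countP (fun s => pvIsValidB 0 s.toList) ≠ 0 then
        ((arr1.countP (fun s => pvIsValidB 0 s.toList) : Int)
          * (arr2.countP (fun s => pvIsValidB 0 s.toList) : Int))
      else -1)
      + ((PySem.Set.ofList
            ((arr1.filter (fun s => !pvIsValidB 0 s.toList)).map pvReduceKeyB)).map
          (fun k =>
            (((arr1.filter (fun s => !pvIsValidB 0 s.toList)).map pvReduceKeyB).count k : Int)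
            * (((arr2.filter (fun s => !pvIsValidB 0 s.toList)).map pvNeedKeyB).count k : Int))).sum := by
  unfold solution
  -- replace A's validity test by B's everywhere
  have hval1 : arr1.filter (fun a => pvIsValidA a) = arr1.filter (fun s => pvIsValidB 0 s.toList) :=
    List.filter_congr (fun a _ => pvIsValid_eq a)
  have hval2 : arr2.filter (fun a => pvIsValidA a) = arr2.filter (fun s => pvIsValidB 0 s.toList) :=
    List.filter_congr (fun a _ => pvIsValid_eq a)
  have hinv1 : arr1.filter (fun a => !pvIsValidA a) = arr1.filter (fun s => !pvIsValidB 0 s.toList) :=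
    List.filter_congr (fun a _ => by rw [pvIsValid_eq a])
  have hinv2 : arr2.filter (fun a => !pvIsValidA a) = arr2.filter (fun s => !pvIsValidB 0 s.toList) :=
    List.filter_congr (fun a _ => by rw [pvIsValid_eq a])
  rw [hval1, hval2, hinv1, hinv2]
  set L1 := arr1.filter (fun s => !pvIsValidB 0 s.toList) with hL1
  set L2 := arr2.filter (fun s => !pvIsValidB 0 s.toList) with hL2
  -- A's keys and values
  have hkey1 : ∀ v : String, String.mk (pvLoopA v.toList) = pvReduceKeyB v := by
    intro v; rw [pvLoopA_eq_fold]; rfl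
  -- rewrite the two dict-building folds to use pvReduceKeyB / pvNeedKeyB
  have hd1 : (L1.foldl (fun d v0 =>
        d.insert (String.mk (pvLoopA v0.toList))
          (d.getD (String.mk (pvLoopA v0.toList)) [] ++ [String.mk (pvLoopA v0.toList)]))
        PySem.Dict.empty)
      = (L1.foldl (fun d v0 =>
          d.insert (pvReduceKeyB v0) (d.getD (pvReduceKeyB v0) [] ++ [pvReduceKeyB v0]))
          PySem.Dict.empty) := by
    apply PySem.List.foldl_congr_mem
    intro d v0 _
    rw [hkey1 v0]
  have hd2 : (L2.foldl (fun d v =>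
        d.insert (String.mk ((PySem.List.slice? (pvNewExpA v) none none (-1)).getD []))
          (d.getD (String.mk ((PySem.List.slice? (pvNewExpA v) none none (-1)).getD [])) []
            ++ [String.mk (pvNewExpA v)]))
        PySem.Dict.empty)
      = (L2.foldl (fun d v =>
          d.insert (pvNeedKeyB v) (d.getD (pvNeedKeyB v) [] ++ [String.mk (pvNewExpA v)]))
          PySem.Dict.empty) := by
    apply PySem.List.foldl_congr_mem
    intro d v _
    rw [pvKey2_eq v]
  simp only []
  rw [hd1, hd2]
  set D1 := L1.foldl (fun d v0 =>
      d.insert (pvReduceKeyB v0) (d.getD (pvReduceKeyB v0) [] ++ [pvReduceKeyB v0]))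
      PySem.Dict.empty with hD1
  set D2 := L2.foldl (fun d v =>
      d.insert (pvNeedKeyB v) (d.getD (pvNeedKeyB v) [] ++ [String.mk (pvNewExpA v)]))
      PySem.Dict.empty with hD2
  -- final fold is base + sum
  rw [PySem.List.foldl_add D1.items
    (fun kv => (kv.2.length : Int) * ((D2.getD kv.1 []).length : Int))]
  congr 1
  · -- the -1 / product base
    have e1 : (arr1.filter (fun s => pvIsValidB 0 s.toList)).length
        = arr1.countP (fun s => pvIsValidB 0 s.toList) := by
      rw [← List.countP_eq_length_filter]
    have e2 : (arr2.filter (fun s => pvIsValidB 0 s.toList)).length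
        = arr2.countP (fun s => pvIsValidB 0 s.toList) := by
      rw [← List.countP_eq_length_filter]
    by_cases h1 : arr1.countP (fun s => pvIsValidB 0 s.toList) = 0
    · have : arr1.filter (fun s => pvIsValidB 0 s.toList) = [] := by
        rw [← List.length_eq_zero_iff, e1, h1]
      simp [this, h1]
    · by_cases h2 : arr2.countP (fun s => pvIsValidB 0 s.toList) = 0
      · have : arr2.filter (fun s => pvIsValidB 0 s.toList) = [] := by
          rw [← List.length_eq_zero_iff, e2, h2]
        simp [this, h2]
      · have hne1 : arr1.filter (fun s => pvIsValidB 0 s.toList) ≠ [] := by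
          intro hnil
          apply h1
          rw [← e1, hnil]; rfl
        have hne2 : arr2.filter (fun s => pvIsValidB 0 s.toList) ≠ [] := by
          intro hnil
          apply h2
          rw [← e2, hnil]; rfl
        rw [if_pos ⟨hne1, hne2⟩, if_pos ⟨h1, h2⟩, e1, e2]
  · -- the sum over dict items
    have hnd : D1.keys.Nodup := by
      rw [hD1]
      exact PySem.Dict.nodup_keys_foldl_insert_key L1 pvReduceKeyB _ _ (by simp)
    have hkeys : D1.keys = PySem.Set.ofList (L1.map pvReduceKeyB) := by
      rw [hD1, PySem.Dict.keys_foldl_insert_key]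
      simp [PySem.Set.update_nil_left]
    rw [PySem.Dict.items_eq_map_keys D1 hnd []]
    rw [List.map_map]
    apply congrArg
    rw [hkeys]
    apply List.map_congr_left
    intro k _
    simp only [Function.comp]
    have hg1 : (D1.getD k []).length = (L1.map pvReduceKeyB).count k := by
      rw [hD1, pvDictA_getD pvReduceKeyB pvReduceKeyB L1 PySem.Dict.empty k]
      simp
    have hg2 : (D2.getD k []).length = (L2.map pvNeedKeyB).count k := by
      rw [hD2, pvDictA_getD pvNeedKeyB (fun v => String.mk (pvNewExpA v)) L2 PySem.Dict.empty k]
      simp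
    rw [hg1, hg2]

theorem pvSolutionAlt_eq_canon (arr1 arr2 : List String) :
    solution_alt arr1 arr2 =
      (if arr1.countP (fun s => pvIsValidB 0 s.toList) ≠ 0 ∧
          arr2.countP (fun s => pvIsValidB 0 s.toList) ≠ 0 then
        ((arr1.countP (fun s => pvIsValidB 0 s.toList) : Int)
          * (arr2.countP (fun s => pvIsValidB 0 s.toList) : Int))
      else -1)
      + ((PySem.Set.ofList
            ((arr1.filter (fun s => !pvIsValidB 0 s.toList)).map pvReduceKeyB)).map
          (fun k =>
            (((arr1.filter (fun s => !pvIsValidB 0 s.toList)).map pvReduceKeyB).count k : Int)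
            * (((arr2.filter (fun s => !pvIsValidB 0 s.toList)).map pvNeedKeyB).count k : Int))).sum := by
  unfold solution_alt
  rw [pvScanB_eq arr1 pvReduceKeyB, pvScanB_eq arr2 pvNeedKeyB]
  simp only []
  set ks1 := (arr1.filter (fun s => !pvIsValidB 0 s.toList)).map pvReduceKeyB with hks1
  set ks2 := (arr2.filter (fun s => !pvIsValidB 0 s.toList)).map pvNeedKeyB with hks2
  rw [PySem.List.foldl_add (PySem.Dict.counter ks1).items
    (fun kv => kv.2 * (PySem.Dict.counter ks2).getD kv.1 0)]
  congr 1
  · -- base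
    by_cases h1 : arr1.countP (fun s => pvIsValidB 0 s.toList) = 0
    · simp [h1]
    · by_cases h2 : arr2.countP (fun s => pvIsValidB 0 s.toList) = 0
      · simp [h2]
      · have h1' : ((arr1.countP (fun s => pvIsValidB 0 s.toList) : Int)) ≠ 0 := by
          exact_mod_cast h1
        have h2' : ((arr2.countP (fun s => pvIsValidB 0 s.toList) : Int)) ≠ 0 := by
          exact_mod_cast h2
        rw [if_pos ⟨h1', h2'⟩, if_pos ⟨h1, h2⟩]
  · -- sum
    rw [PySem.Dict.items_counter ks1, List.map_map]
    apply congrArg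
    apply List.map_congr_left
    intro k _
    simp only [Function.comp]
    rw [PySem.Dict.getD_counter ks2 k]

-- ===== VERDICT (by name: the statement is the Claim_ definition above) =====
theorem solution_spec : Claim_equal_solution := by
  intro arr1 arr2 _
  unfold Spec_solution
  rw [pvSolution_eq_canon, pvSolutionAlt_eq_canon]
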